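-- pv_equiv track=rewrite | github.com/shreytec11/Leetcode_subs | 2057-smallest-index-with-equal-value/2057-smallest-index-with-equal-value.py | smallestEqual
-- ===== SOURCE A (Python) =====
-- from typing import List
--
-- def smallestEqual(nums: List[int]) -> int:
--
--     count = []
--
--     for i in range(len(nums)):
--
--         if i % 10 == nums[i]:
--
--             count.append(i)
--
--     if len(count) == 0:
--
--         return -1
--
--     else:
--         return min(count)
-- ===== SOURCE B (Python) =====
-- def smallestEqual(nums):
--     for i, x in enumerate(nums):
--         if i % 10 == x:
--             return i
--     return -1
-- ===== Notes on version B (the rewrite author's own statement) =====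
-- stated objective: simpler
-- what changed: B returns the first index i with i % 10 == nums[i] directly from a single early-exit enumerate loop (candidates appear in ascending order), eliminating A's materialized candidate list and its separate min() pass.
import Mathlib
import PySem

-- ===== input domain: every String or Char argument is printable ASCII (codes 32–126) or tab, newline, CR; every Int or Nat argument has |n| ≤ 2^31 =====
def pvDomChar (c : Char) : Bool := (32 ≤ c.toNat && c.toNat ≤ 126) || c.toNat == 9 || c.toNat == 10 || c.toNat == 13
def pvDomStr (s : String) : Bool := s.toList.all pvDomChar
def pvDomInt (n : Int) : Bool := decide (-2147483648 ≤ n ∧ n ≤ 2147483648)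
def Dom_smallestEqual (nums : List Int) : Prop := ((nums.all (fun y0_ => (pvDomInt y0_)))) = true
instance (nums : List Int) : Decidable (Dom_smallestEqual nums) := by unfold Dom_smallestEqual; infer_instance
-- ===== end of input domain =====

-- B replaces A's collect-all-candidates-then-min with a single early-exit scan
-- (first hit is the minimum since indices are visited in ascending order): simpler, no list, no min pass.


-- ===== PORT A =====
-- count = []; for i in range(len(nums)): if i % 10 == nums[i]: count.append(i)
-- if len(count) == 0: return -1 else: return min(count)
-- pyGetD default 0 is never used: every i of the range is in bounds.
-- min? is some on the nonempty branch; getD 0 is never the default.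
def smallestEqual (nums : List Int) : Int :=
  let count : List Int :=
    (PySem.List.pyRange 0 (nums.length : Int) 1).foldl
      (fun acc i => if PySem.Int.mod i 10 = PySem.List.pyGetD nums i 0 then acc ++ [i] else acc) []
  if count.length = 0 then -1
  else (PySem.List.min? count (fun y => y)).getD 0

-- ===== PORT B =====
-- for i, x in enumerate(nums): if i % 10 == x: return i
-- return -1
def smallestEqualAltGo (xs : List Int) (i : Int) : Int :=
  match xs with
  | [] => -1
  | x :: rest => if PySem.Int.mod i 10 = x then i else smallestEqualAltGo rest (i + 1)

def smallestEqual_alt (nums : List Int) : Int := smallestEqualAltGo nums 0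

-- ===== PRECONDITION & SPEC =====
def Spec_smallestEqual (nums : List Int) (out : Int) : Prop := out = smallestEqual_alt nums
instance (nums : List Int) (out : Int) : Decidable (Spec_smallestEqual nums out) := by unfold Spec_smallestEqual; infer_instance

-- ===== CLAIM (what is proved, stated in full; the proofs are below) =====
def Claim_equal_smallestEqual : Prop := ∀ (nums : List Int), Dom_smallestEqual nums → Spec_smallestEqual nums (smallestEqual nums)

-- ===== LEMMAS AND PROOFS =====

-- the first element of a strictly increasing list is its min?
lemma min?_of_pairwise_lt (j : Int) (rest : List Int)
    (h : List.Pairwise (· < ·) (j :: rest)) :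
    PySem.List.min? (j :: rest) (fun y => y) = some j := by
  obtain ⟨m, hm⟩ : ∃ m, PySem.List.min? (j :: rest) (fun y => y) = some m := by
    cases he : PySem.List.min? (j :: rest) (fun y => y) with
    | none => exact absurd ((PySem.List.min?_eq_none_iff _ _).mp he) (by simp)
    | some m => exact ⟨m, rfl⟩
  have hmem := PySem.List.min?_mem hm
  have hle := PySem.List.min?_isMin hm j (by simp)
  rcases List.mem_cons.mp hmem with h1 | h1
  · rw [hm, h1]
  · exact absurd hle (not_le.mpr ((List.pairwise_cons.mp h).1 m h1))
  
-- B's scan returns the head of the filtered index range (or -1 if it is empty)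
lemma altGo_filter (nums : List Int) : ∀ (xs : List Int) (s : Int), 0 ≤ s →
    xs = nums.drop s.toNat →
    smallestEqualAltGo xs s =
      match (PySem.List.pyRange s (nums.length : Int) 1).filter
          (fun i => decide (PySem.Int.mod i 10 = PySem.List.pyGetD nums i 0)) with
      | [] => -1
      | j :: _ => j := by
  intro xs
  induction xs with
  | nil =>
    intro s hs hdrop
    have hlen : (nums.length : Int) ≤ s := by
      have := List.drop_eq_nil_iff.mp hdrop.symm
      omega
    rw [PySem.List.pyRange_one_eq_nil hlen]
    simp [smallestEqualAltGo]
  | cons x rest ih =>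
    intro s hs hdrop
    have hslt : s.toNat < nums.length := by
      by_contra hge
      have hnil : nums.drop s.toNat = [] := List.drop_eq_nil_iff.mpr (by omega)
      rw [hnil] at hdrop
      exact absurd hdrop (by simp)
    have hsl : s < (nums.length : Int) := by omega
    have hget : PySem.List.pyGetD nums s 0 = x := by
      rw [PySem.List.pyGetD_eq_getElem nums 0 hs (by omega)]
      have h0 : nums[s.toNat]? = some x := by
        have hc := congrArg (fun l => l[0]?) hdrop
        simpa using hc.symm
      obtain ⟨_, hx⟩ := List.getElem?_eq_some_iff.mp h0
      exact hx
    have hrest : rest = nums.drop (s + 1).toNat := by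
      have h1 : (s + 1).toNat = s.toNat + 1 := by omega
      rw [h1, ← List.drop_drop, ← hdrop]
      rfl
    have h2 := ih (s + 1) (by omega) hrest
    rw [PySem.List.pyRange_one_cons hsl, List.filter_cons]
    by_cases hp : PySem.Int.mod s 10 = x
    · have hp' : s % 10 = x := by simpa using hp
      simp [smallestEqualAltGo, hget, hp']
    · simp only [smallestEqualAltGo, hget, hp, decide_false, Bool.false_eq_true, if_false]
      exact h2

-- ===== VERDICT (by name: the statement is the Claim_ definition above) =====
theorem smallestEqual_spec : Claim_equal_smallestEqual := by
  intro nums _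
  unfold Spec_smallestEqual smallestEqual smallestEqual_alt
  simp only []
  have hfun : (fun (acc : List Int) (i : Int) =>
        if PySem.Int.mod i 10 = PySem.List.pyGetD nums i 0 then acc ++ [i] else acc)
      = (fun (acc : List Int) (i : Int) =>
        if decide (PySem.Int.mod i 10 = PySem.List.pyGetD nums i 0) = true then acc ++ [i] else acc) := by
    funext acc i
    simp only [decide_eq_true_eq]
  rw [hfun]
  rw [PySem.List.foldl_append_if
    (fun i => decide (PySem.Int.mod i 10 = PySem.List.pyGetD nums i 0)) (fun i => i)
    (PySem.List.pyRange 0 (nums.length : Int) 1) []]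
  simp only [List.map_id_fun', id, List.nil_append]
  rw [altGo_filter nums nums 0 le_rfl (by simp)]
  cases hf : (PySem.List.pyRange 0 (nums.length : Int) 1).filter
      (fun i => decide (PySem.Int.mod i 10 = PySem.List.pyGetD nums i 0)) with
  | nil => simp
  | cons j rest =>
    have hpw : List.Pairwise (· < ·) (j :: rest) := by
      rw [← hf]
      exact (PySem.List.pairwise_lt_pyRange_one 0 (nums.length : Int)).filter _
    simp [min?_of_pairwise_lt j rest hpw]
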